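-- pv_equiv track=rewrite | github.com/brutist/ossu-computer-science-course | 6.0001-mit/ps3/ps3.py | update_hand
-- ===== SOURCE A (Python) =====
-- def get_frequency_dict(sequence):
--   """
--     Returns a dictionary where the keys are elements of the sequence
--     and the values are integer counts, for the number of times that
--     an element is repeated in the sequence.
--
--     sequence: string or list
--     return: dictionary
--     """
--
--   # freqs: dictionary (element_type -> int)
--   freq = {}
--   for x in sequence:
--     freq[x] = freq.get(x, 0) + 1
--   return freq
--
-- def update_hand(hand, word):
--   """
--     Does NOT assume that hand contains every letter in word at least as
--     many times as the letter appears in word. Letters in word that don't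
--     appear in hand should be ignored. Letters that appear in word more times
--     than in hand should never result in a negative count; instead, set the
--     count in the returned hand to 0 (or remove the letter from the
--     dictionary, depending on how your code is structured).
--
--     Updates the hand: uses up the letters in the given word
--     and returns the new hand, without those letters in it.
--
--     Has no side effects: does not modify hand.
--
--     word: string
--     hand: dictionary (string -> int)
--     returns: dictionary (string -> int)
--     """
--   word_letters = get_frequency_dict(word.lower())
--   hand_letters = hand.copy()
--
--   # Compare the letters in the word to the hand
--   for k, v in word_letters.items():
--     if not k in hand.keys():  # if the letter in word is not in hand; ignore it. User input something that's not supposed to be included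
--       continue
--     if k in hand.keys() and v >= hand_letters[k]:  # if user input letter more than or equal to the hand. Updated hand should no longer have those letters
--       hand_letters.pop(k)
--     else:  # if input is less than no. of times it occurs in hand. Updated hand should be "no. of 'x' letter in hand - no. of 'x' letter in input"
--       hand_letters[k] = hand[k] - v
--
--   return hand_letters
-- ===== SOURCE B (Python) =====
-- def update_hand(hand, word):
--     word_freq = {}
--     for ch in word.lower():
--         word_freq[ch] = word_freq.get(ch, 0) + 1
--     result = {}
--     for k, c in hand.items():
--         v = word_freq.get(k, 0)
--         if v == 0 or v < c:
--             result[k] = c - v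
--     return result
-- ===== Notes on version B (the rewrite author's own statement) =====
-- stated objective: alternative
-- what changed: B drives a single pass over hand.items(), building a fresh dict and keeping each letter k (count c) with value c - word_freq.get(k,0) unless the word fully uses it up, instead of A's copy-then-mutate loop over the word's letter frequencies with membership tests against hand.
import Mathlib
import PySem

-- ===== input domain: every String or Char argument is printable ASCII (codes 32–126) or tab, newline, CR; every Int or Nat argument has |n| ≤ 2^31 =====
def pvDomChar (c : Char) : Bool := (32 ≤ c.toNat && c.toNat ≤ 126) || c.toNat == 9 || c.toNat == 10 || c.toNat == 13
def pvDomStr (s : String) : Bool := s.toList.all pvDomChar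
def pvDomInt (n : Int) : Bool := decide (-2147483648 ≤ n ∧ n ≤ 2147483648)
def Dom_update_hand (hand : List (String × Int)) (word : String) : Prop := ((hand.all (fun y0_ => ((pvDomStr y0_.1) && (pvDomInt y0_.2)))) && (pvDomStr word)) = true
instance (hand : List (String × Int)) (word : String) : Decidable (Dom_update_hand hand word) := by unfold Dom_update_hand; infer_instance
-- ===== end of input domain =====

-- B builds the result in one pass over the hand's entries, keyed by a word-frequency dict built once,
-- instead of A's copy-then-mutate loop over the word's letter frequencies (alternative decomposition, same cost).

-- ===== PORT A =====
-- 'for x in sequence: freq[x] = freq.get(x, 0) + 1'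
def get_frequency_dict (sequence : List String) : PySem.Dict String Int :=
  sequence.foldl (fun freq x => freq.insert x (freq.getD x 0 + 1)) PySem.Dict.empty

-- iterating a Python str yields its 1-character strings
def pyStrChars (s : String) : List String := s.toList.map (fun c => String.ofList [c])

def update_hand (hand : List (String × Int)) (word : String) : List (String × Int) :=
  let handD : PySem.Dict String Int := PySem.Dict.ofList hand
  let word_letters := get_frequency_dict (pyStrChars (PySem.Str.lower word))
  -- hand_letters = hand.copy(); then the loop over word_letters.items()
  -- (hand_letters[k] / hand[k] are ported as getD _ 0: at each use the key is present, so this is exact)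
  let hand_letters := word_letters.items.foldl (fun hl kv =>
      if handD.contains kv.1 = false then hl
      else if handD.contains kv.1 && decide (kv.2 ≥ hl.getD kv.1 0) then hl.erase kv.1
      else hl.insert kv.1 (handD.getD kv.1 0 - kv.2)) handD
  hand_letters.items

-- ===== PORT B =====
def update_hand_alt (hand : List (String × Int)) (word : String) : List (String × Int) :=
  let word_freq : PySem.Dict String Int :=
    (pyStrChars (PySem.Str.lower word)).foldl (fun d ch => d.insert ch (d.getD ch 0 + 1)) PySem.Dict.empty
  let result := (PySem.Dict.ofList hand).items.foldl (fun r kc =>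
      let v := word_freq.getD kc.1 0
      if v == 0 || v < kc.2 then r.insert kc.1 (kc.2 - v) else r) PySem.Dict.empty
  result.items

-- ===== PRECONDITION & SPEC =====
def Spec_update_hand (hand : List (String × Int)) (word : String) (out : List (String × Int)) : Prop := out = update_hand_alt hand word
instance (hand : List (String × Int)) (word : String) (out : List (String × Int)) : Decidable (Spec_update_hand hand word out) := by unfold Spec_update_hand; infer_instance

-- ===== CLAIM (what is proved, stated in full; the proofs are below) =====
def Claim_equal_update_hand : Prop := ∀ (hand : List (String × Int)) (word : String), Dom_update_hand hand word → Spec_update_hand hand word (update_hand hand word)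

-- ===== LEMMAS AND PROOFS =====

lemma get?_erase_of_ne (hl : PySem.Dict String Int) (k x : String) (h : x ≠ k) :
    (hl.erase k).get? x = hl.get? x := by
  simp only [PySem.Dict.get?, PySem.Dict.erase, List.find?_filter]
  have : (fun a : String × Int => decide ((!a.1 == k) = true ∧ (a.1 == x) = true)) = (fun p => p.1 == x) := by
    funext p
    cases hpx : p.1 == x
    · simp [hpx]
    · rw [beq_iff_eq] at hpx; subst hpx; simp [h]
  rw [this]

lemma contains_of_mem_items (d : PySem.Dict String Int) (p : String × Int) (h : p ∈ d.items) :
    d.contains p.1 = true := by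
  simp only [PySem.Dict.contains, List.any_eq_true]
  exact ⟨p, h, by simp⟩

lemma foldA (ws : List (String × Int)) (d : PySem.Dict String Int)
    (hl : PySem.Dict String Int)
    (hnod : hl.keys.Nodup)
    (hsub : ∀ k, hl.contains k = true → d.contains k = true)
    (hws : (ws.map (·.1)).Nodup)
    (hval : ∀ p ∈ ws, hl.get? p.1 = d.get? p.1) :
    (ws.foldl (fun hl kv =>
      if d.contains kv.1 = false then hl
      else if d.contains kv.1 && decide (kv.2 ≥ hl.getD kv.1 0) then hl.erase kv.1
      else hl.insert kv.1 (d.getD kv.1 0 - kv.2)) hl).items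
    = hl.items.filterMap (fun p =>
        match ws.find? (fun q => q.1 == p.1) with
        | none => some p
        | some q => if q.2 ≥ p.2 then none else some (p.1, p.2 - q.2)) := by
  induction ws generalizing hl with
  | nil => simp
  | cons q rest ih =>
    obtain ⟨k, v⟩ := q
    simp only [List.map_cons, List.nodup_cons, List.mem_map] at hws
    obtain ⟨hknotin, hrestnd⟩ := hws
    have hknotin' : ∀ p ∈ rest, p.1 ≠ k := by
      intro p hp heq; exact hknotin ⟨p, hp, heq⟩
    simp only [List.foldl_cons]
    by_cases hc : d.contains k = true
    · have hgk : hl.get? k = d.get? k := hval (k, v) (List.mem_cons_self)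
      have hhl : hl.contains k = true := by
        rw [PySem.Dict.contains_eq_isSome_get?, hgk, ← PySem.Dict.contains_eq_isSome_get?]
        exact hc
      have hdv : hl.getD k 0 = d.getD k 0 := by
        simp [PySem.Dict.getD, hgk]
      by_cases hge : v ≥ hl.getD k 0
      · -- erase branch
        have hstep : (if d.contains k = false then hl
            else if d.contains k && decide (v ≥ hl.getD k 0) then hl.erase k
            else hl.insert k (d.getD k 0 - v)) = hl.erase k := by
          simp [hc, hge]
        rw [hstep]
        have herase_items : (hl.erase k).items = hl.items.filter (fun p => !(p.1 == k)) := rfl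
        have hnod' : (hl.erase k).keys.Nodup := by
          simp only [PySem.Dict.keys, herase_items]
          exact ((List.filter_sublist).map _).nodup hnod
        have hsub' : ∀ k', (hl.erase k).contains k' = true → d.contains k' = true := by
          intro k' hk'
          apply hsub
          simp only [PySem.Dict.contains, List.any_eq_true, herase_items, List.mem_filter] at hk' ⊢
          obtain ⟨p, ⟨hp, _⟩, hpe⟩ := hk'
          exact ⟨p, hp, hpe⟩
        have hval' : ∀ p ∈ rest, (hl.erase k).get? p.1 = d.get? p.1 := by
          intro p hp
          rw [get?_erase_of_ne _ _ _ (hknotin' p hp)]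
          exact hval p (List.mem_cons_of_mem _ hp)
        rw [ih (hl.erase k) hnod' hsub' hrestnd hval']
        rw [herase_items, List.filterMap_filter]
        apply List.filterMap_congr
        intro p hp
        obtain ⟨pk, pv⟩ := p
        by_cases hpk : pk = k
        · have hpd : hl.getD pk 0 = pv := PySem.Dict.getD_of_mem_items hl hp hnod 0
          rw [List.find?_cons_of_pos (by simp [hpk])]
          have : v ≥ pv := by rw [← hpd, hpk]; exact hge
          simp [hpk, this]
        · rw [List.find?_cons_of_neg (by simp [Ne.symm hpk])]
          simp [hpk]
      · -- insert branch
        have hstep : (if d.contains k = false then hl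
            else if d.contains k && decide (v ≥ hl.getD k 0) then hl.erase k
            else hl.insert k (d.getD k 0 - v)) = hl.insert k (d.getD k 0 - v) := by
          simp [hc, hge]
        rw [hstep]
        set nv : Int := d.getD k 0 - v with hnv
        have hitems : (hl.insert k nv).items = hl.items.map (fun p => if p.1 == k then (k, nv) else p) :=
          PySem.Dict.items_insert_of_contains _ _ hhl
        have hnod' : (hl.insert k nv).keys.Nodup := by
          rw [PySem.Dict.keys_insert_of_contains _ _ hhl]; exact hnod
        have hsub' : ∀ k', (hl.insert k nv).contains k' = true → d.contains k' = true := by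
          intro k' hk'
          rw [PySem.Dict.contains_insert] at hk'
          rcases Bool.or_eq_true_iff.mp hk' with h1 | h2
          · rw [beq_iff_eq] at h1; subst h1; exact hc
          · exact hsub k' h2
        have hval' : ∀ p ∈ rest, (hl.insert k nv).get? p.1 = d.get? p.1 := by
          intro p hp
          rw [PySem.Dict.get?_insert_of_ne _ _ (hknotin' p hp)]
          exact hval p (List.mem_cons_of_mem _ hp)
        rw [ih _ hnod' hsub' hrestnd hval']
        rw [hitems, List.filterMap_map]
        apply List.filterMap_congr
        intro p hp
        obtain ⟨pk, pv⟩ := p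
        by_cases hpk : pk = k
        · have hpd : hl.getD pk 0 = pv := PySem.Dict.getD_of_mem_items hl hp hnod 0
          have hp2 : pv = d.getD k 0 := by rw [← hpd, hpk, hdv]
          have hfr : rest.find? (fun q => q.1 == k) = none := by
            rw [List.find?_eq_none]
            intro q hq
            simp [hknotin' q hq]
          have hnge : ¬ (v ≥ pv) := by rw [← hpd, hpk]; exact hge
          rw [List.find?_cons_of_pos (by simp [hpk])]
          simp only [Function.comp_apply, hpk, beq_self_eq_true, if_true]
          rw [hfr]
          simp only [ge_iff_le]
          rw [if_neg (by omega)]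
          simp [hnv]
          omega
        · rw [List.find?_cons_of_neg (by simp [Ne.symm hpk])]
          simp only [Function.comp]
          rw [if_neg (by simp [hpk])]
    · -- not in hand: skip
      simp only [Bool.not_eq_true] at hc
      have hstep : (if d.contains k = false then hl
          else if d.contains k && decide (v ≥ hl.getD k 0) then hl.erase k
          else hl.insert k (d.getD k 0 - v)) = hl := by
        simp [hc]
      rw [hstep]
      rw [ih hl hnod hsub hrestnd (fun p hp => hval p (List.mem_cons_of_mem _ hp))]
      apply List.filterMap_congr
      intro p hp
      have hpk : p.1 ≠ k := by
        intro heq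
        have := contains_of_mem_items hl p hp
        rw [heq] at this
        exact absurd (hsub k this) (by simp [hc])
      rw [List.find?_cons_of_neg (by simp [Ne.symm hpk])]
lemma filterMap_eq_filter_map {α β : Type} (l : List α) (f : α → Option β) (p : α → Bool) (h : α → β)
    (H : ∀ a ∈ l, f a = if p a then some (h a) else none) : l.filterMap f = (l.filter p).map h := by
  induction l with
  | nil => simp
  | cons a t ih =>
    simp only [List.filterMap_cons, List.filter_cons, H a List.mem_cons_self]
    cases hpa : p a <;> simp [hpa, ih (fun x hx => H x (List.mem_cons_of_mem _ hx))]

set_option maxHeartbeats 1000000 in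
theorem update_hand_eq_alt (hand : List (String × Int)) (word : String) :
    update_hand hand word = update_hand_alt hand word := by
  unfold update_hand update_hand_alt
  simp only [get_frequency_dict, PySem.Dict.foldl_insert_getD_add_one_eq_counter]
  set L := pyStrChars (PySem.Str.lower word) with hL
  set d := PySem.Dict.ofList hand with hd
  set wf := PySem.Dict.counter L with hwf
  simp only [← hwf]
  have hdnod : d.keys.Nodup := PySem.Dict.nodup_keys_ofList hand
  -- A side
  rw [foldA wf.items d d hdnod (fun _ h => h)
        (by simpa [PySem.Dict.keys] using PySem.Dict.nodup_keys_counter L)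
        (fun _ _ => rfl)]
  -- B side
  rw [PySem.List.foldl_if_eq_foldl_filter]
  have hB := PySem.Dict.items_foldl_insert_fresh
      (l := d.items.filter (fun kc => wf.getD kc.1 0 == 0 || decide (wf.getD kc.1 0 < kc.2)))
      (k := fun kc : String × Int => kc.1)
      (v := fun kc : String × Int => kc.2 - wf.getD kc.1 0)
      (d := PySem.Dict.empty)
      (fun a _ => PySem.Dict.contains_empty _)
      (((List.filter_sublist).map _).nodup hdnod)
  rw [hB]
  apply filterMap_eq_filter_map
  intro a ha
  obtain ⟨k, c⟩ := a
  cases hf : wf.items.find? (fun q => q.1 == k) with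
  | none =>
    have hget : wf.get? k = none := by
      simp [PySem.Dict.get?, hf]
    have hgd : wf.getD k 0 = 0 := by simp [PySem.Dict.getD, hget]
    simp [hgd, hf]
  | some q =>
    have hqk : q.1 = k := by
      have := List.find?_some hf
      rwa [beq_iff_eq] at this
    have hget : wf.get? k = some q.2 := by
      simp [PySem.Dict.get?, hf]
    have hgd : wf.getD k 0 = q.2 := by simp [PySem.Dict.getD, hget]
    have hqmem := List.mem_of_find?_eq_some hf
    have hpos : 1 ≤ q.2 := by
      rw [hwf, PySem.Dict.items_counter] at hqmem
      obtain ⟨x, hx, hxq⟩ := List.mem_map.mp hqmem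
      have hxL : x ∈ L := (PySem.Set.mem_ofList _ _).mp hx
      have : (1 : Int) ≤ (L.count x : Int) := by
        exact_mod_cast List.count_pos_iff.mpr hxL
      rw [← hxq]
      simpa using this
    simp only [hf, hgd]
    by_cases hcmp : q.2 ≥ c
    · rw [if_pos hcmp, if_neg (by simp; omega)]
    · rw [if_neg hcmp, if_pos (by simp; omega)]

-- ===== VERDICT (by name: the statement is the Claim_ definition above) =====
theorem update_hand_spec : Claim_equal_update_hand := by
  intro hand word _
  exact update_hand_eq_alt hand word
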